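-- pv_equiv track=rewrite | github.com/Tusharfv15/financial-doc-analyzer | Dolphin/clean_markdown.py | remove_boilerplate_blocks
-- ===== SOURCE A (Python) =====
-- BOILERPLATE_MARKERS = [
--     "MOST IMPORTANT TERMS AND CONDITIONS",
--     "GREAT OFFERS ON YOUR CARD",
--     "IMPORTANT MESSAGES",
--     "Safe Banking Tips",
--     "To get the complete version of Credit Cards",
--     "Making only minimum payment every month",
--     "Please pay your Credit Card outstanding",
--     "For any clarification or more information",
--     "Mark-up fee and corresponding GST",
--     "Payment through UPI is subject to",
--     "SMS Mobile to",
--     "Download the iMobile app",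
--     "All communications are being sent",
--     "To update email ID",
--     "To update mobile number",
--     "This is an authenticated intimation",
--     "TMC apply",
--     "Offer Valid till",
--     "For more details, visit www.icicibank.com/creditcardoffers",
-- ]
--
-- def remove_boilerplate_blocks(text: str) -> str:
--     """
--     Remove blocks of text that start with known boilerplate markers.
--     Removes the marker line and the paragraph following it.
--     """
--     lines = text.split('\n')
--     cleaned = []
--     skip_until_blank = False
--
--     for line in lines:
--         # Check if this line starts a boilerplate block
--         is_boilerplate = any(marker.lower() in line.lower() for marker in BOILERPLATE_MARKERS)
--
--         if is_boilerplate: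
--             skip_until_blank = True
--             continue
--
--         if skip_until_blank:
--             if line.strip() == '':
--                 skip_until_blank = False
--             continue
--
--         cleaned.append(line)
--
--     return '\n'.join(cleaned)
-- ===== SOURCE B (Python) =====
-- BOILERPLATE_MARKERS = [
--     "MOST IMPORTANT TERMS AND CONDITIONS",
--     "GREAT OFFERS ON YOUR CARD",
--     "IMPORTANT MESSAGES",
--     "Safe Banking Tips",
--     "To get the complete version of Credit Cards",
--     "Making only minimum payment every month",
--     "Please pay your Credit Card outstanding",
--     "For any clarification or more information",
--     "Mark-up fee and corresponding GST",
--     "Payment through UPI is subject to",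
--     "SMS Mobile to",
--     "Download the iMobile app",
--     "All communications are being sent",
--     "To update email ID",
--     "To update mobile number",
--     "This is an authenticated intimation",
--     "TMC apply",
--     "Offer Valid till",
--     "For more details, visit www.icicibank.com/creditcardoffers",
-- ]
--
--
-- def remove_boilerplate_blocks(text: str) -> str:
--     """Interval algorithm: each marker line at index i removes the closed
--     interval [i, next_blank[i]].  Stage 1 (backward pass) precomputes
--     next_blank; stage 2 sweeps forward keeping a line iff its index lies
--     beyond the furthest interval endpoint opened so far."""
--     markers = [m.lower() for m in BOILERPLATE_MARKERS]
--     lines = text.split('\n')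
--     n = len(lines)
--     # backward pass: next_blank[i] = index of nearest blank line after i (n if none)
--     next_blank = [n] * n
--     nb = n
--     for i in range(n - 1, -1, -1):
--         next_blank[i] = nb
--         if lines[i].strip() == '':
--             nb = i
--     # forward sweep over the removal intervals [i, next_blank[i]]
--     end = -1
--     kept = []
--     for i, line in enumerate(lines):
--         low = line.lower()
--         if any(m in low for m in markers):
--             end = max(end, next_blank[i])
--         elif i > end:
--             kept.append(line)
--     return '\n'.join(kept)
-- ===== Notes on version B (the rewrite author's own statement) =====
-- stated objective: alternative
-- what changed: Replaces A's stateful skip-until-blank flag pass with a two-stage interval algorithm: a backward pass precomputes each line's next-blank index, then a forward sweep removes the union of closed intervals [marker, next_blank] by tracking only the furthest interval endpoint; markers are lowercased once instead of once per line.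
import Mathlib
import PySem

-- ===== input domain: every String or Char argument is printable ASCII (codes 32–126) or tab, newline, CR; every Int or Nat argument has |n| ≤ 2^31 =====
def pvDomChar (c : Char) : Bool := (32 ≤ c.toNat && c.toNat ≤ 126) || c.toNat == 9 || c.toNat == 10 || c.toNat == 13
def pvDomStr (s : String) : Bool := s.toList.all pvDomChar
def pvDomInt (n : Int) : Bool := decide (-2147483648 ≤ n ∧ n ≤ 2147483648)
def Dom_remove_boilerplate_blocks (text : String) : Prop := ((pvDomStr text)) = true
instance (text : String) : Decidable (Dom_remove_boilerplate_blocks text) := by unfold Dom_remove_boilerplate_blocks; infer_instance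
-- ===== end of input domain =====

-- B replaces A's skip-until-blank flag pass by a two-stage interval algorithm (backward
-- next-blank pass + forward interval-union sweep); objective: alternative.

def BOILERPLATE_MARKERS : List String := [
  "MOST IMPORTANT TERMS AND CONDITIONS",
  "GREAT OFFERS ON YOUR CARD",
  "IMPORTANT MESSAGES",
  "Safe Banking Tips",
  "To get the complete version of Credit Cards",
  "Making only minimum payment every month",
  "Please pay your Credit Card outstanding",
  "For any clarification or more information",
  "Mark-up fee and corresponding GST",
  "Payment through UPI is subject to",
  "SMS Mobile to",
  "Download the iMobile app",
  "All communications are being sent",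
  "To update email ID",
  "To update mobile number",
  "This is an authenticated intimation",
  "TMC apply",
  "Offer Valid till",
  "For more details, visit www.icicibank.com/creditcardoffers"]

-- ===== PORT A =====
-- the for-loop of A: state (cleaned, skip_until_blank)
def pvALoop : List String → List String → Bool → List String
  | [], cleaned, _ => cleaned
  | line :: rest, cleaned, skip =>
    if BOILERPLATE_MARKERS.any (fun m => PySem.Str.isIn (PySem.Str.lower m) (PySem.Str.lower line)) then
      pvALoop rest cleaned true
    else if skip then
      if PySem.Str.strip line == "" then pvALoop rest cleaned false
      else pvALoop rest cleaned true
    else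
      pvALoop rest (cleaned ++ [line]) skip

def remove_boilerplate_blocks (text : String) : String :=
  PySem.Str.join "\n" (pvALoop ((PySem.Str.split? text "\n").getD []) [] false)

-- ===== PORT B =====
-- backward pass: for the suffix of lines starting at index i, returns
-- (next_blank values for these positions, first blank index ≥ i (sentinel n if none))
def pvNB : Int → List String → (List Int × Int)
  | i, [] => ([], i)
  | i, l :: rest =>
    let p := pvNB (i+1) rest
    (p.2 :: p.1, if PySem.Str.strip l == "" then i else p.2)

-- forward sweep: state (i, end = furthest removal-interval endpoint so far, kept)
def pvBSweep (markers : List String) : List String → List Int → Int → Int → List String → List String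
  | [], _, _, _, kept => kept
  | _ :: _, [], _, _, kept => kept   -- unreachable: the lists have equal length
  | line :: rest, nb :: nbs, i, e, kept =>
    let low := PySem.Str.lower line
    if markers.any (fun m => PySem.Str.isIn m low) then
      pvBSweep markers rest nbs (i+1) (max e nb) kept
    else if i > e then
      pvBSweep markers rest nbs (i+1) e (kept ++ [line])
    else
      pvBSweep markers rest nbs (i+1) e kept

def remove_boilerplate_blocks_alt (text : String) : String :=
  let lines := (PySem.Str.split? text "\n").getD []
  PySem.Str.join "\n"
    (pvBSweep (BOILERPLATE_MARKERS.map PySem.Str.lower) lines (pvNB 0 lines).1 0 (-1) [])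

-- ===== PRECONDITION & SPEC =====
def Spec_remove_boilerplate_blocks (text : String) (out : String) : Prop := out = remove_boilerplate_blocks_alt text
instance (text : String) (out : String) : Decidable (Spec_remove_boilerplate_blocks text out) := by unfold Spec_remove_boilerplate_blocks; infer_instance

-- ===== CLAIM (what is proved, stated in full; the proofs are below) =====
def Claim_equal_remove_boilerplate_blocks : Prop := ∀ (text : String), Dom_remove_boilerplate_blocks text → Spec_remove_boilerplate_blocks text (remove_boilerplate_blocks text)

-- ===== LEMMAS AND PROOFS =====

-- the two marker tests agree
theorem pv_marker_eq (line : String) :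
    (BOILERPLATE_MARKERS.map PySem.Str.lower).any (fun m => PySem.Str.isIn m (PySem.Str.lower line))
      = BOILERPLATE_MARKERS.any (fun m => PySem.Str.isIn (PySem.Str.lower m) (PySem.Str.lower line)) := by
  simp [List.any_map, Function.comp_def]

-- the first-blank value of the backward pass never precedes its start index
theorem pvNB_snd_ge (lines : List String) : ∀ (i : Int), i ≤ (pvNB i lines).2 := by
  induction lines with
  | nil => intro i; simp [pvNB]
  | cons l rest ih =>
    intro i
    simp only [pvNB]
    split
    · omega
    · have := ih (i+1); omega

-- loop invariant: A's skip flag is "i ≤ end", where end is the furthest interval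
-- endpoint so far; end is either < i (interval closed) or exactly the first blank ≥ i
theorem pv_loop_eq (lines : List String) : ∀ (acc : List String) (i e : Int),
    (e < i ∨ e = (pvNB i lines).2) →
    pvALoop lines acc (decide (i ≤ e))
      = pvBSweep (BOILERPLATE_MARKERS.map PySem.Str.lower) lines (pvNB i lines).1 i e acc := by
  induction lines with
  | nil => intro acc i e _; rfl
  | cons line rest ih =>
    intro acc i e he
    have hge : (i+1) ≤ (pvNB (i+1) rest).2 := pvNB_snd_ge rest (i+1)
    simp only [pvNB] at he ⊢
    rw [pvALoop, pvBSweep]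
    simp only [pv_marker_eq line]
    by_cases hs : (PySem.Str.strip line == "") = true <;>
      simp only [hs, if_true, Bool.false_eq_true, if_false] at he ⊢ <;>
      by_cases hm : BOILERPLATE_MARKERS.any (fun m => PySem.Str.isIn (PySem.Str.lower m) (PySem.Str.lower line)) = true <;>
      simp only [hm, if_true, Bool.false_eq_true, if_false]
    · -- blank, marker
      have h1 : (true : Bool) = decide (i+1 ≤ max e (pvNB (i+1) rest).2) := by simp; omega
      rw [h1, ih acc (i+1) (max e (pvNB (i+1) rest).2) (by omega)]
    · -- blank, no marker
      by_cases hsk : i ≤ e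
      · have hskd : decide (i ≤ e) = true := by simp [hsk]
        have h2 : ¬ (i > e) := by omega
        simp only [hskd, if_true, h2, if_false]
        have h3 : (false : Bool) = decide (i+1 ≤ e) := by simp; omega
        rw [h3, ih acc (i+1) e (by omega)]
      · have hskd : decide (i ≤ e) = false := by simp; omega
        have h2 : i > e := by omega
        simp only [hskd, Bool.false_eq_true, if_false, h2, if_true]
        have h3 : (false : Bool) = decide (i+1 ≤ e) := by simp; omega
        rw [h3, ih (acc ++ [line]) (i+1) e (by omega)]
    · -- non-blank, marker
      have h1 : (true : Bool) = decide (i+1 ≤ max e (pvNB (i+1) rest).2) := by simp; omega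
      rw [h1, ih acc (i+1) (max e (pvNB (i+1) rest).2) (by omega)]
    · -- non-blank, no marker
      by_cases hsk : i ≤ e
      · have hskd : decide (i ≤ e) = true := by simp [hsk]
        have h2 : ¬ (i > e) := by omega
        simp only [hskd, if_true, h2, if_false]
        have h3 : (true : Bool) = decide (i+1 ≤ e) := by simp; omega
        rw [h3, ih acc (i+1) e (by omega)]
      · have hskd : decide (i ≤ e) = false := by simp; omega
        have h2 : i > e := by omega
        simp only [hskd, Bool.false_eq_true, if_false, h2, if_true]
        have h3 : (false : Bool) = decide (i+1 ≤ e) := by simp; omega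
        rw [h3, ih (acc ++ [line]) (i+1) e (by omega)]

-- ===== VERDICT (by name: the statement is the Claim_ definition above) =====
theorem remove_boilerplate_blocks_spec : Claim_equal_remove_boilerplate_blocks := by
  intro text _
  unfold Spec_remove_boilerplate_blocks remove_boilerplate_blocks remove_boilerplate_blocks_alt
  have h := pv_loop_eq ((PySem.Str.split? text "\n").getD []) [] 0 (-1) (by left; omega)
  have hd : (decide ((0 : Int) ≤ -1)) = false := by decide
  rw [hd] at h
  rw [h]
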